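-- pv_equiv track=rewrite | github.com/harveycyl/solution-engineering-portfolio | 0020-Valid-Parentheses/solution.py | _filter_string_literals
-- ===== SOURCE A (Python) =====
-- def _filter_string_literals(brackets_string):
--     """Helper method to remove brackets inside string literals."""
--     # Simplified version - in production, would need more sophisticated parsing
--     result = []
--     in_string = False
--     quote_char = None
--
--     for char in brackets_string:
--         if char in '\'"' and not in_string:
--             in_string = True
--             quote_char = char
--         elif char == quote_char and in_string:
--             in_string = False
--             quote_char = None
--         elif not in_string and char in '()[]{}':
--             result.append(char)
--
--     return ''.join(result)
-- ===== SOURCE B (Python) =====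
-- def _filter_string_literals(brackets_string):
--     """Helper method to remove brackets inside string literals."""
--     # Stage 1: cut the text into its outside-of-string-literal segments
--     # using str.find and slicing (no per-character scan).
--     parts = []
--     rest = brackets_string
--     while True:
--         cuts = [i for i in (rest.find("'"), rest.find('"')) if i != -1]
--         if not cuts:
--             parts.append(rest)
--             break
--         j = min(cuts)
--         parts.append(rest[:j])
--         k = rest.find(rest[j], j + 1)
--         rest = '' if k == -1 else rest[k + 1:]
--     # Stage 2: keep only the brackets of the concatenated outside text.
--     return ''.join(c for c in ''.join(parts) if c in '()[]{}')
-- ===== Notes on version B (the rewrite author's own statement) =====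
-- stated objective: alternative
-- what changed: Replaces A's per-character in_string/quote_char state machine with a staged computation: first cut the text into its outside-of-string-literal segments via str.find and slicing, then filter the brackets out of their concatenation in a separate pass.
import Mathlib
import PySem

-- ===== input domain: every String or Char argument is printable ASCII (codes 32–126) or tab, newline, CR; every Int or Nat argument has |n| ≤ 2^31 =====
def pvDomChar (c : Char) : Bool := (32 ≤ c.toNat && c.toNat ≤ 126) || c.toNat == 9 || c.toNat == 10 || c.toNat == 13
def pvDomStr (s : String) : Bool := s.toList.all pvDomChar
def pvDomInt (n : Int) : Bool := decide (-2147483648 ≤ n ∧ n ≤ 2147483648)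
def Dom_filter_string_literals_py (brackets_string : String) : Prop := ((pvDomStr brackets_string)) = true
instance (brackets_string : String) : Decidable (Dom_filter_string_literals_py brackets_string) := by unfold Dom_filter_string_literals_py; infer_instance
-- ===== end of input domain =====

-- B is a staged rewrite: stage 1 cuts out the outside-of-string-literal segments with str.find and slicing, stage 2 filters the brackets from their concatenation (alternative decomposition, same cost).


-- ===== PORT A =====
-- `char in '()[]{}'` (shared by both ports; also stage 2 of Source B)
def pvIsBracket (c : Char) : Bool := c == '(' || c == ')' || c == '[' || c == ']' || c == '{' || c == '}'

-- state = (result, in_string, quote_char); literal transcription of A's for-loop body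
def pvStepA (st : List Char × Bool × Option Char) (c : Char) : List Char × Bool × Option Char :=
  if (c == '\'' || c == '"') && !st.2.1 then (st.1, true, some c)
  else if (st.2.2 == some c) && st.2.1 then (st.1, false, none)
  else if !st.2.1 && pvIsBracket c then (st.1 ++ [c], st.2.1, st.2.2) else st

def filter_string_literals_py (brackets_string : String) : String :=
  String.mk (List.foldl pvStepA ([], false, none) brackets_string.toList).1

-- ===== PORT B =====
-- Source B's `min(cuts)` over the two str.find results (-1 ↦ none); findIdx? is exact for str.find
def pvMinCut (rest : List Char) : Option Nat :=
  match rest.findIdx? (· == '\''), rest.findIdx? (· == '"') with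
  | none, none => none
  | some i, none => some i
  | none, some i => some i
  | some i, some j => some (min i j)

-- the while loop of Source B, concatenating the appended parts as it goes;
-- `rest.find(rest[j], j+1)` is ported as findIdx? on the suffix past j
def pvParts (rest : List Char) : List Char :=
  match h : pvMinCut rest with
  | none => rest
  | some j =>
    rest.take j ++
      (match (rest.drop (j+1)).findIdx? (· == rest.getD j ' ') with
       | none => pvParts []
       | some k => pvParts ((rest.drop (j+1)).drop (k+1)))
termination_by rest.length
decreasing_by
  all_goals
    have hne : rest ≠ [] := by
      intro e; subst e; simp [pvMinCut, List.findIdx?, List.findIdx?.go] at h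
    have hlen : 0 < rest.length := List.length_pos_iff.mpr hne
  · exact hlen
  · simp only [List.length_drop]; omega

-- stage 2: keep only the brackets of the concatenated outside text
def filter_string_literals_py_alt (brackets_string : String) : String :=
  String.mk ((pvParts brackets_string.toList).filter pvIsBracket)

-- ===== PRECONDITION & SPEC =====
def Spec_filter_string_literals_py (brackets_string : String) (out : String) : Prop := out = filter_string_literals_py_alt brackets_string
instance (brackets_string : String) (out : String) : Decidable (Spec_filter_string_literals_py brackets_string out) := by unfold Spec_filter_string_literals_py; infer_instance

-- ===== CLAIM (what is proved, stated in full; the proofs are below) =====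
def Claim_equal_filter_string_literals_py : Prop := ∀ (brackets_string : String), Dom_filter_string_literals_py brackets_string → Spec_filter_string_literals_py brackets_string (filter_string_literals_py brackets_string)

-- ===== LEMMAS AND PROOFS =====
-- Proof-side intermediate program: the span-skipping scan; A's fold and B's staged
-- computation are each shown equal to it.
def pvSkipB (q : Char) : List Char → List Char
  | [] => []
  | c :: rest => if c == q then rest else pvSkipB q rest

theorem pvSkipB_length_le (q : Char) (l : List Char) : (pvSkipB q l).length ≤ l.length := by
  induction l with
  | nil => simp [pvSkipB]
  | cons c rest ih =>
    simp only [pvSkipB]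
    split
    · simp
    · exact Nat.le_trans ih (Nat.le_succ _)

def pvGoB : List Char → List Char
  | [] => []
  | c :: rest =>
    if c == '\'' || c == '"' then pvGoB (pvSkipB c rest)
    else if pvIsBracket c then c :: pvGoB rest
    else pvGoB rest
termination_by l => l.length
decreasing_by
  · exact Nat.lt_succ_of_le (pvSkipB_length_le _ _)
  · simp
  · simp

theorem pvFoldA_spec (n : Nat) : ∀ l : List Char, l.length ≤ n →
    (∀ acc, (List.foldl pvStepA (acc, false, none) l).1 = acc ++ pvGoB l) ∧
    (∀ acc q, (List.foldl pvStepA (acc, true, some q) l).1 = acc ++ pvGoB (pvSkipB q l)) := by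
  induction n with
  | zero =>
    intro l hl
    have : l = [] := List.length_eq_zero_iff.mp (Nat.le_zero.mp hl)
    subst this
    simp [pvGoB, pvSkipB]
  | succ n ih =>
    intro l hl
    cases l with
    | nil => simp [pvGoB, pvSkipB]
    | cons c rest =>
      have hr : rest.length ≤ n := Nat.le_of_succ_le_succ hl
      constructor
      · intro acc
        by_cases hq : (c == '\'' || c == '"') = true
        · simp only [List.foldl, pvStepA, hq, Bool.not_false, Bool.and_true, if_pos rfl, pvGoB, hq, if_pos]
          exact (ih rest hr).2 acc c
        · by_cases hb : pvIsBracket c = true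
          · simp only [List.foldl, pvStepA, pvGoB, hq, hb]
            simp only [Bool.false_and, Bool.not_false, Bool.true_and, reduceCtorEq,
              Bool.and_self, Bool.and_false, if_false, if_true, Bool.false_eq_true, reduceIte]
            rw [(ih rest hr).1 (acc ++ [c])]
            simp
          · simp only [List.foldl, pvStepA, pvGoB, hq, hb]
            simp only [Bool.false_and, Bool.not_false, Bool.true_and, reduceCtorEq,
              Bool.and_self, Bool.and_false, if_false, if_true, Bool.false_eq_true, reduceIte]
            rw [(ih rest hr).1 acc]
      · intro acc q
        by_cases hc : (q = c)
        · subst hc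
          simp only [List.foldl, pvStepA, Bool.not_true, Bool.and_false, if_false, beq_self_eq_true,
            Bool.true_and, if_pos rfl, pvSkipB, beq_self_eq_true, if_pos]
          exact (ih rest hr).1 acc
        · have hne : (some q == some c) = false := by simp [hc]
          have hc2 : ¬ c = q := fun h => hc h.symm
          have hne2 : (c == q) = false := by simp [hc2]
          simp only [List.foldl, pvStepA, Bool.not_true, Bool.and_false, if_false, hne,
            Bool.false_and, pvSkipB, hne2, hc2]
          exact (ih rest hr).2 acc q

theorem pvParts_nil : pvParts [] = [] := by
  rw [pvParts]
  simp [pvMinCut, List.findIdx?, List.findIdx?.go]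

theorem pvMinCut_cons_quote (c : Char) (tl : List Char) (hq : (c == '\'' || c == '"') = true) :
    pvMinCut (c :: tl) = some 0 := by
  rcases Bool.or_eq_true_iff.mp hq with h | h
  · have hc : c = '\'' := by simpa using h
    subst hc
    unfold pvMinCut
    simp only [List.findIdx?_cons]
    cases tl.findIdx? (· == '"') <;> simp [Nat.min_def]
  · have hc : c = '"' := by simpa using h
    subst hc
    unfold pvMinCut
    simp only [List.findIdx?_cons]
    cases tl.findIdx? (· == '\'') <;> simp [Nat.min_def]

theorem pvMinCut_cons_nonquote (c : Char) (tl : List Char) (hq : (c == '\'' || c == '"') = false) :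
    pvMinCut (c :: tl) = (pvMinCut tl).map (· + 1) := by
  have h1 : (c == '\'') = false := by
    cases h : (c == '\'') <;> simp_all
  have h2 : (c == '"') = false := by
    cases h : (c == '"') <;> simp_all
  unfold pvMinCut
  simp only [List.findIdx?_cons, h1, h2, Bool.false_eq_true, reduceIte]
  cases tl.findIdx? (· == '\'') <;> cases tl.findIdx? (· == '"') <;>
    simp [Option.map, Nat.succ_min_succ]

theorem pvParts_cons_nonquote (c : Char) (tl : List Char) (hq : (c == '\'' || c == '"') = false) :
    pvParts (c :: tl) = c :: pvParts tl := by
  conv_lhs => rw [pvParts]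
  conv_rhs => rw [pvParts]
  rw [pvMinCut_cons_nonquote c tl hq]
  cases h : pvMinCut tl with
  | none => simp [h]
  | some j =>
    simp only [h, Option.map_some]
    simp only [List.take_succ_cons, List.drop_succ_cons, List.getD_cons_succ, List.cons_append]

theorem pvParts_cons_quote (c : Char) (tl : List Char) (hq : (c == '\'' || c == '"') = true) :
    pvParts (c :: tl) =
      (match tl.findIdx? (· == c) with
       | none => []
       | some k => pvParts (tl.drop (k + 1))) := by
  rw [pvParts]
  rw [pvMinCut_cons_quote c tl hq]
  simp only [List.take_zero, List.drop_succ_cons, List.drop_zero, List.getD_cons_zero,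
    List.nil_append]
  cases tl.findIdx? (· == c) <;> simp [pvParts_nil]

theorem pvSkipB_eq_findIdx (q : Char) (l : List Char) :
    pvSkipB q l = (match l.findIdx? (· == q) with
                   | none => []
                   | some k => l.drop (k + 1)) := by
  induction l with
  | nil => simp [pvSkipB]
  | cons c rest ih =>
    simp only [pvSkipB, List.findIdx?_cons]
    by_cases h : (c == q) = true
    · simp [h]
    · simp only [h, Bool.false_eq_true, reduceIte, ih]
      cases rest.findIdx? (· == q) <;> simp

theorem pvGoB_eq_parts (n : Nat) : ∀ l : List Char, l.length ≤ n →
    pvGoB l = (pvParts l).filter pvIsBracket := by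
  induction n with
  | zero =>
    intro l hl
    have : l = [] := List.length_eq_zero_iff.mp (Nat.le_zero.mp hl)
    subst this
    simp [pvGoB, pvParts_nil]
  | succ n ih =>
    intro l hl
    cases l with
    | nil => simp [pvGoB, pvParts_nil]
    | cons c tl =>
      have hr : tl.length ≤ n := Nat.le_of_succ_le_succ hl
      by_cases hq : (c == '\'' || c == '"') = true
      · rw [pvGoB.eq_def]
        simp only [hq, if_pos rfl]
        rw [pvParts_cons_quote c tl hq, pvSkipB_eq_findIdx]
        cases h : tl.findIdx? (· == c) with
        | none => simp [h, pvGoB]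
        | some k =>
          simp only [h]
          exact ih (tl.drop (k + 1)) (by simp only [List.length_drop]; omega)
      · have hq' : (c == '\'' || c == '"') = false := by simpa using hq
        rw [pvGoB.eq_def]
        simp only [hq', Bool.false_eq_true, reduceIte]
        rw [pvParts_cons_nonquote c tl hq', List.filter_cons]
        by_cases hb : pvIsBracket c = true
        · simp only [hb, if_pos rfl]
          rw [ih tl hr]
        · simp only [hb, Bool.false_eq_true, reduceIte]
          rw [ih tl hr]

-- ===== VERDICT (by name: the statement is the Claim_ definition above) =====
theorem filter_string_literals_py_spec : Claim_equal_filter_string_literals_py := by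
  intro s _
  unfold Spec_filter_string_literals_py filter_string_literals_py filter_string_literals_py_alt
  have h := (pvFoldA_spec s.toList.length s.toList (Nat.le_refl _)).1 []
  simp only [List.nil_append] at h
  rw [h, pvGoB_eq_parts s.toList.length s.toList (Nat.le_refl _)]
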